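-- pv_equiv track=rewrite | github.com/PlGGS/Python-For-Programmers | HW3/HW3.py | columnMins
-- ===== SOURCE A (Python) =====
-- def columnMins(table):
--     mins = []
--     for i in range(len(table[0])):
--         tmpMin = None
--         for o in range(len(table)):
--             if ((o == 0) or (table[o][i] < tmpMin)):
--                 tmpMin = table[o][i]
--         mins.append(tmpMin)
--     return mins
--     pass
-- ===== SOURCE B (Python) =====
-- def columnMins(table):
--     mins = list(table[0])
--     for row in table[1:]:
--         for j in range(len(mins)):
--             mins[j] = min(mins[j], row[j])
--     return mins
-- ===== Notes on version B (the rewrite author's own statement) =====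
-- stated objective: simpler
-- what changed: B traverses row-by-row maintaining a running per-column minimum vector, instead of A's column-by-column scan with a None sentinel and index-based double loop.
import Mathlib
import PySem

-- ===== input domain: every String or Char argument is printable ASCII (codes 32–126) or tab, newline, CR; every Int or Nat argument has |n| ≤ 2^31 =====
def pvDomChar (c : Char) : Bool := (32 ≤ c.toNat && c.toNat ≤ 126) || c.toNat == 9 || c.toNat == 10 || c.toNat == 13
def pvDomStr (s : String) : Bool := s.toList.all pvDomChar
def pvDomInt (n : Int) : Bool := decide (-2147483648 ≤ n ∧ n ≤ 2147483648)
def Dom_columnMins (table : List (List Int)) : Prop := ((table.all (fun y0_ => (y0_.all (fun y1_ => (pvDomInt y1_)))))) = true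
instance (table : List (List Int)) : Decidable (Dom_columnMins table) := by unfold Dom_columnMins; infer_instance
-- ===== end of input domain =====

-- B replaces A's column-by-column scan (None sentinel, index double loop) by a row-by-row fold
-- maintaining a running per-column minimum vector; objective: simpler.


-- ===== PORT A =====
-- A: for each column index i of the first row, scan all rows with a None sentinel keeping the strict minimum.
def columnMins (table : List (List Int)) : List Int :=
  (List.range ((table.headD []).length)).foldl
    (fun mins i =>
      let tmp := (List.range table.length).foldl
        (fun tmp o =>
          let v := ((table.getD o []).getD i 0)
          if o == 0 || decide (v < tmp.getD v) then some v else tmp) none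
      mins ++ [tmp.getD 0]) []

-- ===== PORT B =====
-- B: copy the first row as the running per-column minimum vector, update it in place for each later row.
def columnMins_alt (table : List (List Int)) : List Int :=
  match table with
  | [] => []
  | r0 :: rest =>
    rest.foldl (fun mins row =>
      (List.range mins.length).foldl
        (fun m j => m.set j (min (m.getD j 0) (row.getD j 0))) mins) r0

-- ===== PRECONDITION & SPEC =====
-- Pre_ excludes exactly the inputs where Python A raises: the empty table (table[0] IndexError)
-- and tables where some row is shorter than the first row (IndexError on table[o][i]).
def Pre_columnMins (table : List (List Int)) : Prop :=
  table ≠ [] ∧ ∀ row ∈ table, (table.headD []).length ≤ row.length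
instance (table : List (List Int)) : Decidable (Pre_columnMins table) := by
  unfold Pre_columnMins; infer_instance
def pvWitness_columnMins : List (List Int) := [[3, 1], [2, 5, 7]]
def Spec_columnMins (table : List (List Int)) (out : List Int) : Prop := out = columnMins_alt table
instance (table : List (List Int)) (out : List Int) : Decidable (Spec_columnMins table out) := by unfold Spec_columnMins; infer_instance

-- ===== CLAIM (what is proved, stated in full; the proofs are below) =====
def Claim_equal_columnMins : Prop := ∀ (table : List (List Int)), Dom_columnMins table → Pre_columnMins table → Spec_columnMins table (columnMins table)

-- ===== LEMMAS AND PROOFS =====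

-- folding over the indices of a list with getD is folding over the list
theorem foldl_range_getD {α β : Type} (g : β → α → β) (d : α) :
    ∀ (l : List α) (init : β),
      (List.range l.length).foldl (fun acc o => g acc (l.getD o d)) init = l.foldl g init := by
  intro l
  induction l using List.reverseRecOn with
  | nil => intro init; simp
  | append_singleton l x ih =>
    intro init
    simp only [List.length_append, List.length_singleton, List.range_succ,
      List.foldl_append, List.foldl_cons, List.foldl_nil]
    have h1 : (l ++ [x]).getD l.length d = x := by
      simp [List.getD_eq_getElem?_getD]
    rw [h1]
    congr 1
    calc (List.range l.length).foldl (fun acc o => g acc ((l ++ [x]).getD o d)) init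
        = (List.range l.length).foldl (fun acc o => g acc (l.getD o d)) init := by
          apply PySem.List.foldl_congr_mem
          intro acc o ho
          rw [List.getD_append]
          exact List.mem_range.mp ho
      _ = l.foldl g init := ih init

-- A's inner loop after the first row: the option stays `some` and accumulates the minimum
theorem innerA_some (i : Nat) :
    ∀ (rest : List (List Int)) (m : Int),
      rest.foldl
        (fun tmp row =>
          let v := row.getD i 0
          if decide (v < tmp.getD v) then some v else tmp) (some m)
      = some (rest.foldl (fun a row => min a (row.getD i 0)) m) := by
  intro rest
  induction rest with
  | nil => intro m; rfl
  | cons row rest ih =>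
    intro m
    simp only [List.foldl_cons]
    have h : (if decide (row.getD i 0 < (some m).getD (row.getD i 0)) then some (row.getD i 0)
        else some m) = some (min m (row.getD i 0)) := by
      simp only [Option.getD_some]
      rw [min_def]
      split_ifs <;> simp_all
      omega
    split_ifs at h ⊢ <;> simp_all

-- characterisation of A's result
theorem columnMins_char (r0 : List Int) (rest : List (List Int)) :
    columnMins (r0 :: rest)
      = (List.range r0.length).map
          (fun i => rest.foldl (fun a row => min a (row.getD i 0)) (r0.getD i 0)) := by
  unfold columnMins
  rw [PySem.List.foldl_append_singleton_eq_map]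
  simp only [List.headD_cons, List.nil_append]
  apply List.map_congr_left
  intro i _
  have hlen : (r0 :: rest).length = rest.length + 1 := rfl
  rw [hlen, List.range_succ_eq_map, List.foldl_cons]
  simp only [beq_self_eq_true, Bool.true_or, if_pos, List.getD_cons_zero]
  rw [List.foldl_map]
  have hstep :
      (List.range rest.length).foldl
        (fun tmp o =>
          let v := ((r0 :: rest).getD (Nat.succ o) []).getD i 0
          if (Nat.succ o) == 0 || decide (v < tmp.getD v) then some v else tmp)
        (some (r0.getD i 0))
      = (List.range rest.length).foldl
        (fun tmp o =>
          let v := (rest.getD o []).getD i 0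
          if decide (v < tmp.getD v) then some v else tmp)
        (some (r0.getD i 0)) := by
    apply PySem.List.foldl_congr_mem
    intro tmp o _
    simp
  rw [hstep,
    foldl_range_getD (fun tmp row =>
      let v := row.getD i 0
      if decide (v < tmp.getD v) then some v else tmp) ([] : List Int) rest,
    innerA_some]
  rfl

-- B's inner loop: first k positions updated to the min, the rest untouched
theorem updRow_prefix (row : List Int) (m : List Int) :
    ∀ (k : Nat), k ≤ m.length →
      ((List.range k).foldl (fun m j => m.set j (min (m.getD j 0) (row.getD j 0))) m).length
          = m.length
      ∧ ∀ j, ((List.range k).foldl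
            (fun m j => m.set j (min (m.getD j 0) (row.getD j 0))) m).getD j 0
          = if j < k then min (m.getD j 0) (row.getD j 0) else m.getD j 0 := by
  intro k
  induction k with
  | zero => intro _; simp
  | succ k ih =>
    intro hk
    obtain ⟨ihlen, ihget⟩ := ih (Nat.le_of_succ_le hk)
    rw [List.range_succ]
    simp only [List.foldl_append, List.foldl_cons, List.foldl_nil]
    set prev := (List.range k).foldl (fun m j => m.set j (min (m.getD j 0) (row.getD j 0))) m
      with hprev
    constructor
    · rw [List.length_set, ihlen]
    · intro j
      have hgk : prev.getD k 0 = m.getD k 0 := by rw [ihget]; simp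
      by_cases hj : j = k
      · subst hj
        rw [List.getD_eq_getElem?_getD, List.getElem?_set_self (by omega : j < prev.length)]
        simp only [List.getD_eq_getElem?_getD] at hgk
        simp [hgk]
      · have hne : (prev.set k (min (prev.getD k 0) (row.getD k 0))).getD j 0 = prev.getD j 0 := by
          simp [List.getD_eq_getElem?_getD, Ne.symm hj]
        rw [hne, ihget]
        by_cases h2 : j < k
        · rw [if_pos h2, if_pos (by omega)]
        · rw [if_neg h2, if_neg (by omega)]

-- characterisation of B's running fold
theorem columnMins_alt_char (rest : List (List Int)) :
    ∀ (m : List Int),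
      rest.foldl (fun mins row =>
          (List.range mins.length).foldl
            (fun m j => m.set j (min (m.getD j 0) (row.getD j 0))) mins) m
        = (List.range m.length).map
            (fun j => rest.foldl (fun a row => min a (row.getD j 0)) (m.getD j 0)) := by
  induction rest with
  | nil =>
    intro m
    apply List.ext_getElem (by simp)
    intro j hj hj2
    simp [List.getD_eq_getElem?_getD, List.getElem?_eq_getElem (by simpa using hj2)]
  | cons row rest ih =>
    intro m
    simp only [List.foldl_cons]
    obtain ⟨ulen, uget⟩ := updRow_prefix row m m.length (le_refl _)
    set u := (List.range m.length).foldl (fun m j => m.set j (min (m.getD j 0) (row.getD j 0))) m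
      with hu
    rw [ih u, ulen]
    apply List.map_congr_left
    intro j hj
    rw [uget j, if_pos (List.mem_range.mp hj)]

-- the two ports agree on every input
theorem ports_agree (table : List (List Int)) :
    columnMins table = columnMins_alt table := by
  cases table with
  | nil => rfl
  | cons r0 rest =>
    exact (columnMins_char r0 rest).trans (columnMins_alt_char rest r0).symm

-- ===== VERDICT (by name: the statement is the Claim_ definition above) =====
theorem columnMins_spec : Claim_equal_columnMins := by
  intro table _ _
  unfold Spec_columnMins
  exact ports_agree table
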